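-- pv_equiv track=rewrite | github.com/pkulyn/agent-skills | skills/bili2obsidian/src/bilibili.py | aid_to_bvid
-- ===== SOURCE A (Python) =====
-- def aid_to_bvid(aid: int) -> str:
--     """
--     AID转BV号
--     算法来自：https://www.zhihu.com/question/381784377/answer/1099438784
--     """
--     table = 'fZodR9XQDSUm21yCkr6zBqiveYah8bt4xsWpHnJE7jL5VG3guMTKNPAwcF'
--     tr = {c: i for i, c in enumerate(table)}
--     s = [11, 10, 3, 8, 4, 6]
--     xor = 177451812
--     add = 8728348608
--
--     aid = (aid ^ xor) + add
--     r = list('BV1  4 1 7  ')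
--     for i in range(6):
--         r[s[i]] = table[aid // (58 ** i) % 58]
--     return ''.join(r)
-- ===== SOURCE B (Python) =====
-- def aid_to_bvid(aid: int) -> str:
--     """AID -> BV string: build the six-digit base-58 code most-significant-first by
--     recursion, then emit the output in one pass over the template, substituting
--     code characters via a position->code-index map."""
--     table = 'fZodR9XQDSUm21yCkr6zBqiveYah8bt4xsWpHnJE7jL5VG3guMTKNPAwcF'
--
--     def digits(n, k):
--         if k == 0:
--             return ''
--         return digits(n // 58, k - 1) + table[n % 58]
--
--     code = digits((aid ^ 177451812) + 8728348608, 6)  # code[j] holds digit d_{5-j}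
--     pick = {3: 3, 4: 1, 6: 0, 8: 2, 10: 4, 11: 5}     # output position -> index into code
--     return ''.join(code[pick[i]] if i in pick else c
--                    for i, c in enumerate('BV1  4 1 7  '))
-- ===== Notes on version B (the rewrite author's own statement) =====
-- stated objective: alternative
-- what changed: B builds the six-character base-58 code most-significant-first by a recursive conversion function, then produces the output in a single pass over the template string, substituting code characters through a position-to-code-index map, instead of A's loop that scatters power-indexed digits into a mutable list via a position table.
import Mathlib
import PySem

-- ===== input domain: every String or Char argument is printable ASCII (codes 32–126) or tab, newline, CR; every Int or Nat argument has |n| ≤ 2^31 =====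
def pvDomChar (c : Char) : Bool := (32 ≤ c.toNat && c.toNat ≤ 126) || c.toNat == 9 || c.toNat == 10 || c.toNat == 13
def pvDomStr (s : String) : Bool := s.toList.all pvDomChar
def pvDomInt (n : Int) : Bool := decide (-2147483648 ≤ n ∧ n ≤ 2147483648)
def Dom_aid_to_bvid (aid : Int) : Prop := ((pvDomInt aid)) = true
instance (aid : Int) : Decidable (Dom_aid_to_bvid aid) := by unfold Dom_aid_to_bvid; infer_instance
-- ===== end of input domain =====

-- B replaces A's scatter of power-indexed digits into a mutable template list by a
-- recursive MSB-first base-58 conversion plus one mapping pass over the template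
-- (objective: alternative decomposition, not faster).

-- ===== PORT A =====
-- literal transliteration of A; the list indices in `s` are literal and in range,
-- so `.getD` / `.set` are exact for Python's indexing/assignment here
def aid_to_bvid (aid : Int) : String :=
  let table : List Char := "fZodR9XQDSUm21yCkr6zBqiveYah8bt4xsWpHnJE7jL5VG3guMTKNPAwcF".toList
  let _tr : PySem.Dict Char Int :=
    (PySem.List.enumerate table).foldl (fun d p => d.insert p.2 p.1) PySem.Dict.empty
  let s : List Int := [11, 10, 3, 8, 4, 6]
  let xor : Int := 177451812
  let add : Int := 8728348608
  let aid' : Int := (PySem.Int.bxor aid xor) + add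
  let r : List Char := "BV1  4 1 7  ".toList
  let r := (List.range 6).foldl (fun r i =>
    r.set (s.getD i 0).toNat
      (table.getD (PySem.Int.mod (PySem.Int.floordiv aid' ((58 : Int) ^ i)) 58).toNat ' ')) r
  String.mk r

-- ===== PORT B =====
-- transliteration of Source B: `bvDigits` is the recursive helper `digits`
-- (MSB-first: recurse on n // 58 first, append table[n % 58] last)
def bvTable : List Char := "fZodR9XQDSUm21yCkr6zBqiveYah8bt4xsWpHnJE7jL5VG3guMTKNPAwcF".toList

def bvDigits (n : Int) : Nat → List Char
  | 0 => []
  | k + 1 => bvDigits (PySem.Int.floordiv n 58) k ++ [bvTable.getD (PySem.Int.mod n 58).toNat ' ']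

def aid_to_bvid_alt (aid : Int) : String :=
  let code : List Char := bvDigits ((PySem.Int.bxor aid 177451812) + 8728348608) 6
  let pick : PySem.Dict Int Int :=
    PySem.Dict.ofList [(3, 3), (4, 1), (6, 0), (8, 2), (10, 4), (11, 5)]
  String.mk ((PySem.List.enumerate "BV1  4 1 7  ".toList).map (fun p =>
    match pick.get? p.1 with
    | some j => code.getD j.toNat ' '
    | none => p.2))

-- ===== PRECONDITION & SPEC =====
def Spec_aid_to_bvid (aid : Int) (out : String) : Prop := out = aid_to_bvid_alt aid
instance (aid : Int) (out : String) : Decidable (Spec_aid_to_bvid aid out) := by unfold Spec_aid_to_bvid; infer_instance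

-- ===== CLAIM (what is proved, stated in full; the proofs are below) =====
def Claim_equal_aid_to_bvid : Prop := ∀ (aid : Int), Dom_aid_to_bvid aid → Spec_aid_to_bvid aid (aid_to_bvid aid)

-- ===== LEMMAS AND PROOFS =====

theorem ediv_chain (n a : Int) (ha : 0 ≤ a) : n / a / 58 = n / (a * 58) :=
  Int.ediv_ediv_of_nonneg ha

-- ===== VERDICT (by name: the statement is the Claim_ definition above) =====
theorem aid_to_bvid_spec : Claim_equal_aid_to_bvid := by
  intro aid _
  unfold Spec_aid_to_bvid aid_to_bvid aid_to_bvid_alt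
  simp only [bvDigits, bvTable, List.range_succ, List.range_zero, List.foldl_cons,
    List.foldl_nil, List.nil_append, List.cons_append]
  norm_num [PySem.Int.floordiv_eq_ediv_of_pos, ediv_chain]
  rfl
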